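-- pv_equiv track=rewrite | github.com/riddledc/integrations | packages/riddle-proof/runtime/lib/recon.py | extract_screenshot_url
-- ===== SOURCE A (Python) =====
-- def extract_screenshot_url(payload, preferred_label=''):
--     preferred_names = []
--     label = (preferred_label or '').strip()
--     if label:
--         preferred_names = [
--             label,
--             label + '.png',
--             label + '.jpg',
--             label + '.jpeg',
--             label + '.webp',
--         ]
--     outputs = payload.get('outputs') or []
--     for item in outputs:
--         name = item.get('name', '')
--         if name in preferred_names and 'error' not in name:
--             return item.get('url', '')
--     for item in outputs:
--         name = item.get('name', '')
--         if name.endswith(('.png', '.jpg', '.jpeg', '.webp')) and 'error' not in name: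
--             return item.get('url', '')
--     screenshots = payload.get('screenshots') or []
--     for item in screenshots:
--         name = item.get('name', '')
--         if name in preferred_names and 'error' not in name:
--             return item.get('url', '')
--     if screenshots:
--         return screenshots[0].get('url', '')
--     return ''
-- ===== SOURCE B (Python) =====
-- def extract_screenshot_url(payload, preferred_label=''):
--     label = (preferred_label or '').strip()
--     preferred = set()
--     if label:
--         preferred = {label, label + '.png', label + '.jpg', label + '.jpeg', label + '.webp'}
--     ext_candidate = None
--     for item in payload.get('outputs') or []:
--         name = item.get('name', '')
--         if 'error' in name:
--             continue
--         if name in preferred: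
--             return item.get('url', '')
--         if ext_candidate is None and name.endswith(('.png', '.jpg', '.jpeg', '.webp')):
--             ext_candidate = item.get('url', '')
--     if ext_candidate is not None:
--         return ext_candidate
--     first = None
--     for item in payload.get('screenshots') or []:
--         if first is None:
--             first = item.get('url', '')
--         name = item.get('name', '')
--         if name in preferred and 'error' not in name:
--             return item.get('url', '')
--     return first if first is not None else ''
-- ===== Notes on version B (the rewrite author's own statement) =====
-- stated objective: alternative
-- what changed: Replaces A's three sequential first-match scans (preferred-name pass over outputs, extension pass over outputs, screenshots pass plus indexed screenshots[0] fallback) with two single passes that carry the first extension candidate and the first-screenshot fallback as running state.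
import Mathlib
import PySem

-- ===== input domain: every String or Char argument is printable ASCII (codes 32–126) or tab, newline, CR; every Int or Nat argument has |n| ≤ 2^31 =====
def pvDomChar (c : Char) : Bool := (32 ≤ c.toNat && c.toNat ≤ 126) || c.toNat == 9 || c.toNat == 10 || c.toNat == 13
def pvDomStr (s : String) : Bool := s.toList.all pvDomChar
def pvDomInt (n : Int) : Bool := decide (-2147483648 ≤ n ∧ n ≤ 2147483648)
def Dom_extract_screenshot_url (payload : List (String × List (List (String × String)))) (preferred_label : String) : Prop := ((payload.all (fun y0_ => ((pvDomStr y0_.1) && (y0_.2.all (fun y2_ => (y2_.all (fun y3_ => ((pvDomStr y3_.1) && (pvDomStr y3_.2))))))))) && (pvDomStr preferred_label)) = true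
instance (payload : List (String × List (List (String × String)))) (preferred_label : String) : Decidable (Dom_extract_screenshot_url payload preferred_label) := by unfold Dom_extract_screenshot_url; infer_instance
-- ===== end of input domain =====

-- B merges A's three sequential first-match scans into two single passes carrying the
-- extension candidate / first-screenshot fallback as running state (objective: alternative).

-- ===== PORT A =====
-- shared atomic predicates: 'error' in name, name.endswith(('.png','.jpg','.jpeg','.webp'))
def pvIsErr (name : String) : Bool := PySem.Str.isIn "error" name
def pvIsImg (name : String) : Bool :=
  PySem.Str.endswith name ".png" || PySem.Str.endswith name ".jpg" ||
  PySem.Str.endswith name ".jpeg" || PySem.Str.endswith name ".webp"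

-- first loop over outputs: first item whose name is a preferred name and not an error
def pvLoopA1 (preferred : List String) : List (List (String × String)) → Option String
  | [] => none
  | item :: rest =>
    let name := PySem.Dict.getD (PySem.Dict.mk item) "name" ""
    if preferred.contains name && !(pvIsErr name) then
      some (PySem.Dict.getD (PySem.Dict.mk item) "url" "")
    else pvLoopA1 preferred rest

-- second loop over outputs: first item with an image extension and not an error
def pvLoopA2 : List (List (String × String)) → Option String
  | [] => none
  | item :: rest =>
    let name := PySem.Dict.getD (PySem.Dict.mk item) "name" ""
    if pvIsImg name && !(pvIsErr name) then
      some (PySem.Dict.getD (PySem.Dict.mk item) "url" "")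
    else pvLoopA2 rest

-- loop over screenshots: first item whose name is a preferred name and not an error
def pvLoopA3 (preferred : List String) : List (List (String × String)) → Option String
  | [] => none
  | item :: rest =>
    let name := PySem.Dict.getD (PySem.Dict.mk item) "name" ""
    if preferred.contains name && !(pvIsErr name) then
      some (PySem.Dict.getD (PySem.Dict.mk item) "url" "")
    else pvLoopA3 preferred rest

def extract_screenshot_url (payload : List (String × List (List (String × String)))) (preferred_label : String) : String :=
  let label := PySem.Str.strip preferred_label
  let preferred_names : List String :=
    if label = "" then []
    else [label, label ++ ".png", label ++ ".jpg", label ++ ".jpeg", label ++ ".webp"]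
  let outputs := PySem.Dict.getD (PySem.Dict.mk payload) "outputs" []
  match pvLoopA1 preferred_names outputs with
  | some u => u
  | none =>
    match pvLoopA2 outputs with
    | some u => u
    | none =>
      let screenshots := PySem.Dict.getD (PySem.Dict.mk payload) "screenshots" []
      match pvLoopA3 preferred_names screenshots with
      | some u => u
      | none =>
        match screenshots with
        | [] => ""
        | s0 :: _ => PySem.Dict.getD (PySem.Dict.mk s0) "url" ""

-- ===== PORT B =====
-- single pass over outputs: skip error names, return on preferred match, record first extension match
def pvScanOutputsB (preferred : PySem.Set String) (ext : Option String) : List (List (String × String)) → Option String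
  | [] => ext
  | item :: rest =>
    let name := PySem.Dict.getD (PySem.Dict.mk item) "name" ""
    if pvIsErr name then pvScanOutputsB preferred ext rest
    else if PySem.Set.contains preferred name then
      some (PySem.Dict.getD (PySem.Dict.mk item) "url" "")
    else if ext.isNone && pvIsImg name then
      pvScanOutputsB preferred (some (PySem.Dict.getD (PySem.Dict.mk item) "url" "")) rest
    else pvScanOutputsB preferred ext rest

-- single pass over screenshots: remember first url, return on preferred non-error match
def pvScanShotsB (preferred : PySem.Set String) (first : Option String) : List (List (String × String)) → Option String
  | [] => first
  | item :: rest =>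
    let first' := if first.isNone then some (PySem.Dict.getD (PySem.Dict.mk item) "url" "") else first
    let name := PySem.Dict.getD (PySem.Dict.mk item) "name" ""
    if PySem.Set.contains preferred name && !(pvIsErr name) then
      some (PySem.Dict.getD (PySem.Dict.mk item) "url" "")
    else pvScanShotsB preferred first' rest

def extract_screenshot_url_alt (payload : List (String × List (List (String × String)))) (preferred_label : String) : String :=
  let label := PySem.Str.strip preferred_label
  let preferred : PySem.Set String :=
    if label = "" then PySem.Set.empty
    else PySem.Set.ofList [label, label ++ ".png", label ++ ".jpg", label ++ ".jpeg", label ++ ".webp"]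
  match pvScanOutputsB preferred none (PySem.Dict.getD (PySem.Dict.mk payload) "outputs" []) with
  | some u => u
  | none =>
    (pvScanShotsB preferred none (PySem.Dict.getD (PySem.Dict.mk payload) "screenshots" [])).getD ""

-- ===== PRECONDITION & SPEC =====
def Spec_extract_screenshot_url (payload : List (String × List (List (String × String)))) (preferred_label : String) (out : String) : Prop := out = extract_screenshot_url_alt payload preferred_label
instance (payload : List (String × List (List (String × String)))) (preferred_label : String) (out : String) : Decidable (Spec_extract_screenshot_url payload preferred_label out) := by unfold Spec_extract_screenshot_url; infer_instance

-- ===== CLAIM (what is proved, stated in full; the proofs are below) =====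
def Claim_equal_extract_screenshot_url : Prop := ∀ (payload : List (String × List (List (String × String)))) (preferred_label : String), Dom_extract_screenshot_url payload preferred_label → Spec_extract_screenshot_url payload preferred_label (extract_screenshot_url payload preferred_label)

-- ===== LEMMAS AND PROOFS =====

lemma scanOutputs_eq (S : PySem.Set String) (P : List String)
    (h : ∀ n, PySem.Set.contains S n = P.contains n) :
    ∀ (outs : List (List (String × String))) (ext : Option String),
    pvScanOutputsB S ext outs =
      match pvLoopA1 P outs with
      | some u => some u
      | none =>
        match ext with
        | some u => some u
        | none => pvLoopA2 outs := by
  intro outs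
  induction outs with
  | nil => intro ext; cases ext <;> simp [pvScanOutputsB, pvLoopA1, pvLoopA2]
  | cons item rest ih =>
    intro ext
    simp only [pvScanOutputsB, pvLoopA1, pvLoopA2, h]
    by_cases he : pvIsErr (PySem.Dict.getD (PySem.Dict.mk item) "name" "") = true
    · simp [he, ih]
    · by_cases hp : PySem.Dict.getD (PySem.Dict.mk item) "name" "" ∈ P
      · simp [he, hp]
      · cases ext with
        | some u =>
          simp [he, hp, ih]
        | none =>
          by_cases hx : pvIsImg (PySem.Dict.getD (PySem.Dict.mk item) "name" "") = true
          · simp [he, hp, hx, ih]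
          · simp [he, hp, hx, ih]

lemma scanShots_eq (S : PySem.Set String) (P : List String)
    (h : ∀ n, PySem.Set.contains S n = P.contains n) :
    ∀ (shots : List (List (String × String))) (first : Option String),
    pvScanShotsB S first shots =
      match pvLoopA3 P shots with
      | some u => some u
      | none =>
        match first with
        | some u => some u
        | none => shots.head?.map (fun s0 => PySem.Dict.getD (PySem.Dict.mk s0) "url" "") := by
  intro shots
  induction shots with
  | nil => intro first; cases first <;> simp [pvScanShotsB, pvLoopA3]
  | cons item rest ih =>
    intro first
    simp only [pvScanShotsB, pvLoopA3, h]
    by_cases hp : PySem.Dict.getD (PySem.Dict.mk item) "name" "" ∈ P ∧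
        pvIsErr (PySem.Dict.getD (PySem.Dict.mk item) "name" "") = false
    · simp [hp.1, hp.2]
    · cases first with
      | some u =>
        rw [ih]
        cases h3 : pvLoopA3 P rest <;> split_ifs <;> simp_all
      | none =>
        rw [ih]
        cases h3 : pvLoopA3 P rest <;> split_ifs <;> simp_all

lemma set_contains_pref (P : List String) :
    ∀ n, PySem.Set.contains (PySem.Set.ofList P) n = P.contains n := by
  intro n
  by_cases hm : n ∈ P
  · simp [PySem.Set.mem_ofList, hm]
  · simp only [List.contains_eq_mem, hm, decide_false]
    rw [← Bool.not_eq_true]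
    simp [PySem.Set.mem_ofList, hm]

lemma main_eq (payload : List (String × List (List (String × String))))
    (S : PySem.Set String) (P : List String)
    (h : ∀ n, PySem.Set.contains S n = P.contains n) :
    (match pvLoopA1 P (PySem.Dict.getD (PySem.Dict.mk payload) "outputs" []) with
     | some u => u
     | none =>
       match pvLoopA2 (PySem.Dict.getD (PySem.Dict.mk payload) "outputs" []) with
       | some u => u
       | none =>
         match pvLoopA3 P (PySem.Dict.getD (PySem.Dict.mk payload) "screenshots" []) with
         | some u => u
         | none =>
           match PySem.Dict.getD (PySem.Dict.mk payload) "screenshots" [] with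
           | [] => ""
           | s0 :: _ => PySem.Dict.getD (PySem.Dict.mk s0) "url" "") =
    (match pvScanOutputsB S none (PySem.Dict.getD (PySem.Dict.mk payload) "outputs" []) with
     | some u => u
     | none =>
       (pvScanShotsB S none (PySem.Dict.getD (PySem.Dict.mk payload) "screenshots" [])).getD "") := by
  rw [scanOutputs_eq S P h, scanShots_eq S P h]
  cases h1 : pvLoopA1 P (PySem.Dict.getD (PySem.Dict.mk payload) "outputs" []) <;>
    cases h2 : pvLoopA2 (PySem.Dict.getD (PySem.Dict.mk payload) "outputs" []) <;>
      cases h3 : pvLoopA3 P (PySem.Dict.getD (PySem.Dict.mk payload) "screenshots" []) <;>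
        cases h4 : PySem.Dict.getD (PySem.Dict.mk payload) "screenshots" [] <;>
          simp_all

-- ===== VERDICT (by name: the statement is the Claim_ definition above) =====
theorem extract_screenshot_url_spec : Claim_equal_extract_screenshot_url := by
  intro payload preferred_label _
  unfold Spec_extract_screenshot_url extract_screenshot_url extract_screenshot_url_alt
  by_cases hl : PySem.Str.strip preferred_label = ""
  · simp only [if_pos hl]
    exact main_eq payload PySem.Set.empty []
      (by intro n; simp [PySem.Set.contains, PySem.Set.empty])
  · simp only [if_neg hl]
    exact main_eq payload _ _
      (set_contains_pref [PySem.Str.strip preferred_label,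
        PySem.Str.strip preferred_label ++ ".png", PySem.Str.strip preferred_label ++ ".jpg",
        PySem.Str.strip preferred_label ++ ".jpeg", PySem.Str.strip preferred_label ++ ".webp"])
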